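-- pv_equiv track=rewrite | github.com/t0kubetsu/zoneripper | main.py | is_valid_zone_name
-- ===== SOURCE A (Python) =====
-- def is_valid_hostname_label(label: str) -> bool:
--     """
--     Return True if a DNS label looks like a real hostname component.
--     Rejects labels containing null bytes, non-printable characters,
--     or other synthetic patterns injected by some nameservers to
--     trap zone walkers (e.g. \\000, \\001, ...).
--     """
--     if not label:
--         return False
--     # Null-byte / escape sequences used by trap nameservers
--     if "\\000" in label or "\x00" in label:
--         return False
--     # Allow only printable ASCII that is valid in a hostname label
--     allowed = set("abcdefghijklmnopqrstuvwxyzABCDEFGHIJKLMNOPQRSTUVWXYZ0123456789-_.*")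
--     return all(c in allowed for c in label)
--
-- def is_valid_zone_name(name: str, domain: str) -> bool:
--     """
--     Return True if *name* is a plausible real owner name inside *domain*.
--     Strips the domain suffix and validates every remaining label.
--     """
--     if name == domain:
--         return True
--     suffix = f".{domain}"
--     if not name.endswith(suffix):
--         return False
--     subdomain = name[: -len(suffix)]
--     return all(is_valid_hostname_label(lbl) for lbl in subdomain.split("."))
-- ===== SOURCE B (Python) =====
-- def _is_label_char(c):
--     return ('a' <= c <= 'z') or ('A' <= c <= 'Z') or ('0' <= c <= '9') \
--         or c == '-' or c == '_' or c == '*'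
--
-- def is_valid_zone_name(name: str, domain: str) -> bool:
--     if name == domain:
--         return True
--     suffix = "." + domain
--     if not name.endswith(suffix):
--         return False
--     # one-pass DFA over the subdomain: non-empty runs of label chars separated by single dots
--     prev_is_label = False
--     for c in name[: -len(suffix)]:
--         if c == ".":
--             if not prev_is_label:
--                 return False
--             prev_is_label = False
--         elif _is_label_char(c):
--             prev_is_label = True
--         else:
--             return False
--     return prev_is_label
-- ===== Notes on version B (the rewrite author's own statement) =====
-- stated objective: alternative
-- what changed: Replaces A's split-the-subdomain-into-labels pass (plus per-label substring trap checks and a per-character set-membership scan) by a single left-to-right DFA pass over the subdomain that tracks only whether the previous character was a label character; no intermediate label list is built.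
import Mathlib
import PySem

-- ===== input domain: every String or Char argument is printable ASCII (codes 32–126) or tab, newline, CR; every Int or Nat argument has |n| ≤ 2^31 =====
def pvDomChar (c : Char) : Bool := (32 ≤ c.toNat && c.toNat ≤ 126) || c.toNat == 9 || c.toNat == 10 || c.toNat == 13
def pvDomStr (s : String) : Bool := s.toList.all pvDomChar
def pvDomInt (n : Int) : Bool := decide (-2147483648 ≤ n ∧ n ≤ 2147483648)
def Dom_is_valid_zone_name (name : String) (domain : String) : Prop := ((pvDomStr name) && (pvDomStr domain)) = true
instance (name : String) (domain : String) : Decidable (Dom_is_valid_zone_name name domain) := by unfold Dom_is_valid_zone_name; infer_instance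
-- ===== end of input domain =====

-- B replaces A's split-into-labels-then-validate-each pass by a single one-pass DFA over the
-- subdomain (objective: simpler/alternative; same cost, one pass, no intermediate label list).

-- ===== PORT A =====
-- helper: is_valid_hostname_label (set literal hoisted as a named constant)
def pvAllowed : PySem.Set Char :=
  PySem.Set.ofList "abcdefghijklmnopqrstuvwxyzABCDEFGHIJKLMNOPQRSTUVWXYZ0123456789-_.*".toList

def is_valid_hostname_label (label : List Char) : Bool :=
  if label.isEmpty then false
  else if PySem.Chars.isIn "\\000".toList label || PySem.Chars.isIn "\x00".toList label then false
  else label.all (fun c => PySem.Set.contains pvAllowed c)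

def is_valid_zone_name (name : String) (domain : String) : Bool :=
  if name == domain then true
  else
    let suffix : List Char := '.' :: domain.toList
    if !(PySem.Chars.endswith name.toList suffix) then false
    else
      let subdomain := PySem.Chars.slice name.toList none (some (-(suffix.length : Int)))
      (PySem.Chars.splitOn subdomain ['.']).all is_valid_hostname_label

-- ===== PORT B =====
-- helper: _is_label_char (the character class, written as range checks)
def pvLabelChar (c : Char) : Bool :=
  (decide ('a' ≤ c) && decide (c ≤ 'z')) || (decide ('A' ≤ c) && decide (c ≤ 'Z')) ||
  (decide ('0' ≤ c) && decide (c ≤ '9')) || (c == '-') || (c == '_') || (c == '*')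

-- the 'for c in subdomain' DFA loop of Source B (early 'return False' becomes the false branches)
def pvAltScan : List Char → Bool → Bool
  | [], prev => prev
  | c :: rest, prev =>
    if c == '.' then (if !prev then false else pvAltScan rest false)
    else if pvLabelChar c then pvAltScan rest true
    else false

def is_valid_zone_name_alt (name : String) (domain : String) : Bool :=
  if name == domain then true
  else
    let suffix : List Char := '.' :: domain.toList
    if !(PySem.Chars.endswith name.toList suffix) then false
    else pvAltScan (PySem.Chars.slice name.toList none (some (-(suffix.length : Int)))) false

-- ===== PRECONDITION & SPEC =====
def Spec_is_valid_zone_name (name : String) (domain : String) (out : Bool) : Prop := out = is_valid_zone_name_alt name domain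
instance (name : String) (domain : String) (out : Bool) : Decidable (Spec_is_valid_zone_name name domain out) := by unfold Spec_is_valid_zone_name; infer_instance

-- ===== CLAIM (what is proved, stated in full; the proofs are below) =====
def Claim_equal_is_valid_zone_name : Prop := ∀ (name : String) (domain : String), Dom_is_valid_zone_name name domain → Spec_is_valid_zone_name name domain (is_valid_zone_name name domain)

-- ===== LEMMAS AND PROOFS =====
set_option maxRecDepth 8192

-- B's character class is exactly A's allowed set without the dot.
theorem pvLabelChar_eq (c : Char) :
    pvLabelChar c = (PySem.Set.contains pvAllowed c && !(c == '.')) := by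
  have h : (pvAllowed : List Char) =
      ['a','b','c','d','e','f','g','h','i','j','k','l','m','n','o','p','q','r','s','t','u','v','w','x','y','z','A','B','C','D','E','F','G','H','I','J','K','L','M','N','O','P','Q','R','S','T','U','V','W','X','Y','Z','0','1','2','3','4','5','6','7','8','9','-','_','.','*'] := by
    decide
  rw [Bool.eq_iff_iff]
  simp only [pvLabelChar, PySem.Set.contains, h, List.contains_eq_mem, List.mem_cons,
    List.not_mem_nil, or_false, Bool.or_eq_true, Bool.and_eq_true, decide_eq_true_eq, beq_iff_eq,
    Bool.not_eq_eq_eq_not, Bool.not_true, beq_eq_false_iff_ne, ne_eq,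
    Char.le_def, Char.ext_iff, UInt32.le_iff_toNat_le]
  simp [UInt32.ext_iff]
  omega

-- A's trap-pattern substring checks are subsumed by the allowed-character scan.
theorem label_eq (lbl : List Char) :
    is_valid_hostname_label lbl =
      (!lbl.isEmpty && lbl.all (fun c => PySem.Set.contains pvAllowed c)) := by
  unfold is_valid_hostname_label
  by_cases he : lbl.isEmpty = true
  · simp [he]
  · rw [if_neg he]
    by_cases hall : lbl.all (fun c => PySem.Set.contains pvAllowed c) = true
    · have h1 : PySem.Chars.isIn "\\000".toList lbl = false := by
        rw [PySem.Chars.isIn_eq_false_iff]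
        intro hin
        have hm : PySem.Set.contains pvAllowed '\\' = true :=
          (List.all_eq_true.mp hall) '\\' (hin.subset (by decide))
        exact absurd hm (by decide)
      have h2 : PySem.Chars.isIn "\x00".toList lbl = false := by
        rw [PySem.Chars.isIn_eq_false_iff]
        intro hin
        have hm : PySem.Set.contains pvAllowed '\x00' = true :=
          (List.all_eq_true.mp hall) '\x00' (hin.subset (by decide))
        exact absurd hm (by decide)
      rw [if_neg (by rw [h1, h2]; simp)]
      rw [hall]
      simp [he]
    · simp only [Bool.not_eq_true] at hall
      simp only [hall, ite_self, Bool.and_false]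

-- invariant of A's split loop vs B's DFA
theorem go_all (l : List Char) : ∀ (fuel : Nat) (cur : List Char) (acc : List (List Char)),
    l.length < fuel →
    (PySem.Chars.splitOn.go ['.'] fuel l cur acc).all is_valid_hostname_label
      = (acc.all is_valid_hostname_label &&
         (cur.all (fun c => PySem.Set.contains pvAllowed c) && pvAltScan l (!cur.isEmpty))) := by
  induction l with
  | nil =>
    intro fuel cur acc h
    match fuel with
    | f + 1 =>
      simp [PySem.Chars.splitOn.go, label_eq, List.all_reverse, pvAltScan, Bool.and_comm]
  | cons c rest ih =>
    intro fuel cur acc h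
    match fuel with
    | f + 1 =>
      have hf : rest.length < f := by simpa using h
      by_cases hc : c = '.'
      · subst hc
        have hstep : PySem.Chars.splitOn.go ['.'] (f+1) ('.'::rest) cur acc
            = PySem.Chars.splitOn.go ['.'] f rest [] (cur.reverse :: acc) := by
          simp [PySem.Chars.splitOn.go, List.isPrefixOf]
        rw [hstep, ih f [] (cur.reverse :: acc) hf]
        cases hce : cur.isEmpty <;>
          simp [hce, pvAltScan, label_eq, List.all_reverse, Bool.and_comm, Bool.and_left_comm]
      · have hc' : ('.' == c) = false := beq_eq_false_iff_ne.mpr (Ne.symm hc)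
        have hc'' : (c == '.') = false := beq_eq_false_iff_ne.mpr hc
        have hstep : PySem.Chars.splitOn.go ['.'] (f+1) (c::rest) cur acc
            = PySem.Chars.splitOn.go ['.'] f rest (c::cur) acc := by
          simp [PySem.Chars.splitOn.go, List.isPrefixOf, hc']
        rw [hstep, ih f (c::cur) acc hf]
        cases ha : PySem.Set.contains pvAllowed c <;>
          simp [pvAltScan, hc'', pvLabelChar_eq, Bool.and_comm, Bool.and_left_comm,
            Bool.and_assoc]

-- A's whole label pass equals B's DFA started in the 'no pending label' state
theorem split_all_eq (sub : List Char) :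
    (PySem.Chars.splitOn sub ['.']).all is_valid_hostname_label = pvAltScan sub false := by
  simpa [PySem.Chars.splitOn] using go_all sub (sub.length + 1) [] [] (by omega)

-- ===== VERDICT (by name: the statement is the Claim_ definition above) =====
theorem is_valid_zone_name_spec : Claim_equal_is_valid_zone_name := by
  intro name domain _
  unfold Spec_is_valid_zone_name is_valid_zone_name is_valid_zone_name_alt
  by_cases h1 : (name == domain) = true
  · simp [h1]
  · by_cases h2 : PySem.Chars.endswith name.toList ('.' :: domain.toList) = true
    · simp [h1, h2, split_all_eq]
    · simp [h1, h2]
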